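-- pv_equiv track=rewrite | github.com/carlzimmerman/zimmerman-formula | research/proof_attempt/circularity_breaking_final.py | compute_Dk_e_at_n
-- ===== SOURCE A (Python) =====
-- def compute_Dk_e_at_n(n, k, memo={}):
--     if (n, k) in memo:
--         return memo[(n, k)]
--     if k == 0:
--         return 1
--     if n < 2:
--         return 0
--     total = 0
--     for d in range(2, n + 1):
--         total += compute_Dk_e_at_n(n // d, k - 1, memo)
--     memo[(n, k)] = total
--     return total
-- ===== SOURCE B (Python) =====
-- def compute_Dk_e_at_n(n, k, memo={}):
--     # Bottom-up DP over the O(sqrt n) distinct quotient values of n, instead of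
--     # A's top-down recursion with an O(n) divisor scan per node.
--     if k == 0:
--         return 1
--     if n < 2:
--         return 0
--     # c = floor(log2(n)) = length of the longest divisor chain starting at n
--     c = 0
--     m = n
--     while m >= 2:
--         m //= 2
--         c += 1
--     if k < 0 or k > c:
--         return 0          # no chain of length k exists
--     # the distinct values n // d for d = 1..n (collected block by block)
--     vals = []
--     d = 1
--     while d <= n:
--         q = n // d
--         vals.append(q)
--         d = n // q + 1
--     prev = {v: 1 for v in vals}          # level 0: D_0(v) = 1
--     for _ in range(k):
--         cur = {}
--         for v in vals:
--             s = 0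
--             d = 2
--             while d <= v:
--                 q = v // d
--                 d2 = v // q
--                 s += (d2 - d + 1) * prev[q]    # v//x constant on [d, d2]; q is again a quotient of n
--                 d = d2 + 1
--             cur[v] = s
--         prev = cur
--     return prev[n]
-- ===== Notes on version B (the rewrite author's own statement) =====
-- stated objective: faster
-- what changed: Replaces A's top-down recursion with an O(n) divisor scan per node by a bottom-up dynamic program: the O(sqrt n) distinct quotient values of n are collected once, each level k is computed for all of them with quotient-block grouping (d-values sharing n//d handled as one range), and an early exit returns 0 when k exceeds floor(log2 n), the longest possible divisor chain.
import Mathlib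
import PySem

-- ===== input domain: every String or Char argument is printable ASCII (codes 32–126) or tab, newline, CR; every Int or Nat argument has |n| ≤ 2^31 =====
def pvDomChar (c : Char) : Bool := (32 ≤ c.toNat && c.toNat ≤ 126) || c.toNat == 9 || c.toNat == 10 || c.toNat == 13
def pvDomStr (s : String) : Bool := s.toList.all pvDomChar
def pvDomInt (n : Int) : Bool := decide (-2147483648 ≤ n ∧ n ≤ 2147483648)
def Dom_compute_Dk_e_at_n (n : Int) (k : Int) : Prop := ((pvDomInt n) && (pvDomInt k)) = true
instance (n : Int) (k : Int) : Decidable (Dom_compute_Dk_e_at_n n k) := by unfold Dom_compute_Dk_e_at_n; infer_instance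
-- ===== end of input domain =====

-- B replaces A's top-down recursion (an O(n) divisor scan per node) by a bottom-up dynamic
-- program over the O(√n) distinct quotient values of n, with quotient-block grouping per level
-- and an early exit when k exceeds the longest possible divisor chain; equivalence is about the
-- RETURN value only — Python A also caches results in its mutable default-argument dict `memo`,
-- a side effect (and pure optimisation) the pure port drops.

-- ===== PORT A =====
-- recursion shrinks n: n//d < n for 2 ≤ d ≤ n (cited by A's decreasing_by)
theorem pvA_div_lt (n d : Int) (h2 : 2 ≤ d) (hdn : d ≤ n) :
    0 ≤ PySem.Int.floordiv n d ∧ PySem.Int.floordiv n d < n := by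
  constructor
  · have := (PySem.Int.le_floordiv_iff_mul_le (a := n) (b := d) (q := 1) (by omega)).2 (by omega)
    omega
  · rw [PySem.Int.floordiv_lt_iff_lt_mul (by omega)]
    nlinarith

-- literal port of A; the persistent memo dict is a pure cache and is dropped in the pure port
def compute_Dk_e_at_n (n : Int) (k : Int) : Int :=
  if k = 0 then 1
  else if n < 2 then 0
  else
    (PySem.List.pyRange 2 (n + 1) 1).attach.foldl
      (fun total d => total + compute_Dk_e_at_n (PySem.Int.floordiv n d.1) (k - 1)) 0
termination_by n.toNat
decreasing_by
  rename_i hd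
  have hm := (PySem.List.mem_pyRange_one).1 d.2
  have := pvA_div_lt n d.1 (by omega) (by omega)
  omega

-- ===== PORT B =====
-- quotient-block facts (1 ≤ d ≤ n, q = n//d, d2 = n//q): 1 ≤ q, d ≤ d2 ≤ n, and n//x = q on [d, d2]
-- (cited by the B-side loops' decreasing_by and by the proofs)
theorem pvB_quot_facts (n d : Int) (hd : 1 ≤ d) (hdn : d ≤ n) :
    1 ≤ PySem.Int.floordiv n d ∧
    d ≤ PySem.Int.floordiv n (PySem.Int.floordiv n d) ∧
    PySem.Int.floordiv n (PySem.Int.floordiv n d) ≤ n ∧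
    ∀ x : Int, d ≤ x → x ≤ PySem.Int.floordiv n (PySem.Int.floordiv n d) →
      PySem.Int.floordiv n x = PySem.Int.floordiv n d := by
  have hd0 : (0:Int) < d := by omega
  set q := PySem.Int.floordiv n d with hq
  have hq1 : 1 ≤ q := by
    rw [hq, PySem.Int.le_floordiv_iff_mul_le hd0]; omega
  have hq0 : (0:Int) < q := by omega
  have hmul : q * d + PySem.Int.mod n d = n := PySem.Int.floordiv_mul_add_mod n d
  have hmodnn : 0 ≤ PySem.Int.mod n d := PySem.Int.mod_nonneg _ hd0
  have hqd : q * d ≤ n := by omega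
  set d2 := PySem.Int.floordiv n q with hd2def
  have hdd2 : d ≤ d2 := by
    rw [hd2def, PySem.Int.le_floordiv_iff_mul_le hq0]; linarith [hqd, mul_comm q d]
  have hmul2 : d2 * q + PySem.Int.mod n q = n := PySem.Int.floordiv_mul_add_mod n q
  have hmodnn2 : 0 ≤ PySem.Int.mod n q := PySem.Int.mod_nonneg _ hq0
  have hd2n : d2 ≤ n := by nlinarith
  have hlt : n < (q + 1) * d := by
    exact (PySem.Int.floordiv_lt_iff_lt_mul (a := n) (b := d) (q := q + 1) hd0).1 (by omega)
  refine ⟨hq1, hdd2, hd2n, ?_⟩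
  intro x hx1 hx2
  have hx0 : (0:Int) < x := by omega
  have hxq : x * q ≤ n :=
    (PySem.Int.le_floordiv_iff_mul_le (a := n) (b := q) (q := x) hq0).1 hx2
  have hge : q ≤ PySem.Int.floordiv n x := by
    rw [PySem.Int.le_floordiv_iff_mul_le hx0]; linarith [mul_comm x q]
  have hle : PySem.Int.floordiv n x < q + 1 := by
    rw [PySem.Int.floordiv_lt_iff_lt_mul hx0]; nlinarith
  omega

-- the `while m >= 2: m //= 2; c += 1` loop computing c = floor(log2 n)
def pvLog2Loop (m : Int) (c : Int) : Int :=
  if 2 ≤ m then pvLog2Loop (PySem.Int.floordiv m 2) (c + 1) else c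
termination_by m.toNat
decreasing_by
  have h1 := (PySem.Int.le_floordiv_iff_mul_le (a := m) (b := 2) (q := 1) (by omega)).2 (by omega)
  have h2 := (PySem.Int.floordiv_lt_iff_lt_mul (a := m) (b := 2) (q := m) (by omega)).2 (by omega)
  omega

-- the `while d <= n` loop collecting the distinct quotient values n//d, block by block
def pvValsLoop (n : Int) (d : Int) (hd : 1 ≤ d) : List Int :=
  if h : d ≤ n then
    PySem.Int.floordiv n d ::
      pvValsLoop n (PySem.Int.floordiv n (PySem.Int.floordiv n d) + 1)
        (by have := pvB_quot_facts n d hd h; omega)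
  else []
termination_by (n + 1 - d).toNat
decreasing_by
  have := pvB_quot_facts n d hd h
  omega

-- the inner `while d <= v` block loop of one level; prev[q] is ported as (get? q).getD 0 —
-- the proofs below show the key q is always present when the loop is reached from the port
def pvBlockLoop (v : Int) (prev : PySem.Dict Int Int) (s : Int) (d : Int) (hd : 2 ≤ d) : Int :=
  if h : d ≤ v then
    pvBlockLoop v prev
      (s + (PySem.Int.floordiv v (PySem.Int.floordiv v d) - d + 1) *
        ((prev.get? (PySem.Int.floordiv v d)).getD 0))
      (PySem.Int.floordiv v (PySem.Int.floordiv v d) + 1)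
      (by have := pvB_quot_facts v d (by omega) h; omega)
  else s
termination_by (v + 1 - d).toNat
decreasing_by
  have := pvB_quot_facts v d (by omega) h
  omega

-- one level of the DP: `cur = {}; for v in vals: ... ; cur[v] = s`
def pvLevelStep (vals : List Int) (prev : PySem.Dict Int Int) : PySem.Dict Int Int :=
  vals.foldl (fun cur v => cur.insert v (pvBlockLoop v prev 0 2 (by omega))) PySem.Dict.empty

-- `for _ in range(k): prev = step(prev)`
def pvLevels (vals : List Int) (prev : PySem.Dict Int Int) : Nat → PySem.Dict Int Int
  | 0 => prev
  | j + 1 => pvLevelStep vals (pvLevels vals prev j)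

-- literal port of B (Source B)
def compute_Dk_e_at_n_alt (n : Int) (k : Int) : Int :=
  if k = 0 then 1
  else if n < 2 then 0
  else
    if k < 0 ∨ pvLog2Loop n 0 < k then 0
    else
      ((pvLevels (pvValsLoop n 1 (by omega))
          ((pvValsLoop n 1 (by omega)).foldl (fun d v => d.insert v 1) PySem.Dict.empty)
          k.toNat).get? n).getD 0

-- ===== PRECONDITION & SPEC =====
def Spec_compute_Dk_e_at_n (n : Int) (k : Int) (out : Int) : Prop := out = compute_Dk_e_at_n_alt n k
instance (n : Int) (k : Int) (out : Int) : Decidable (Spec_compute_Dk_e_at_n n k out) := by unfold Spec_compute_Dk_e_at_n; infer_instance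

-- ===== CLAIM (what is proved, stated in full; the proofs are below) =====
def Claim_equal_compute_Dk_e_at_n : Prop := ∀ (n : Int) (k : Int), Dom_compute_Dk_e_at_n n k → Spec_compute_Dk_e_at_n n k (compute_Dk_e_at_n n k)

-- ===== LEMMAS AND PROOFS =====

-- A's recursion as a sum over the divisor range
theorem pvA_eq_sum (n k : Int) (hk : ¬ k = 0) (hn : ¬ n < 2) :
    compute_Dk_e_at_n n k =
      ((PySem.List.pyRange 2 (n + 1) 1).map
        (fun d => compute_Dk_e_at_n (PySem.Int.floordiv n d) (k - 1))).sum := by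
  rw [compute_Dk_e_at_n, if_neg hk, if_neg hn]
  rw [List.foldl_attach (l := PySem.List.pyRange 2 (n + 1) 1)
    (f := fun total d => total + compute_Dk_e_at_n (PySem.Int.floordiv n d) (k - 1))]
  rw [PySem.List.foldl_add (g := fun d => compute_Dk_e_at_n (PySem.Int.floordiv n d) (k - 1))]
  simp

-- A vanishes for negative k and for k too large for any divisor chain (n < 2^k)
theorem pvA_zero : ∀ (N : Nat) (n k : Int), n.toNat ≤ N →
    (k < 0 ∨ (1 ≤ k ∧ n < 2 ^ k.toNat)) → compute_Dk_e_at_n n k = 0 := by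
  intro N
  induction N with
  | zero =>
    intro n k hn hk
    rw [compute_Dk_e_at_n, if_neg (by omega), if_pos (by omega)]
  | succ N ih =>
    intro n k hn hk
    by_cases h2 : n < 2
    · rw [compute_Dk_e_at_n, if_neg (by omega), if_pos h2]
    · rw [pvA_eq_sum n k (by omega) h2]
      apply List.sum_eq_zero
      intro y hy
      obtain ⟨x, hx, rfl⟩ := List.mem_map.1 hy
      have hm := (PySem.List.mem_pyRange_one).1 hx
      have hdl := pvA_div_lt n x (by omega) (by omega)
      apply ih
      · omega
      · rcases hk with hneg | ⟨hk1, hkb⟩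
        · left; omega
        · right
          by_cases hk1' : k = 1
          · exfalso
            rw [hk1'] at hkb
            norm_num at hkb
            omega
          · constructor
            · omega
            · have hkt : k.toNat = (k - 1).toNat + 1 := by omega
              rw [PySem.Int.floordiv_lt_iff_lt_mul (by omega)]
              have h1 : (2:Int) ^ (k - 1).toNat * 2 = 2 ^ k.toNat := by
                rw [hkt, pow_succ]
              nlinarith [hm.1, hm.2]

-- accumulator shift for the log loop
theorem pvLog2_shift : ∀ (N : Nat) (m c : Int), m.toNat ≤ N →
    pvLog2Loop m c = pvLog2Loop m 0 + c := by
  intro N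
  induction N with
  | zero =>
    intro m c hm
    rw [pvLog2Loop, if_neg (by omega : ¬ 2 ≤ m)]
    conv_rhs => rw [pvLog2Loop, if_neg (by omega : ¬ 2 ≤ m)]
    omega
  | succ N ih =>
    intro m c hm
    by_cases h : 2 ≤ m
    · have h1 := (PySem.Int.le_floordiv_iff_mul_le (a := m) (b := 2) (q := 1) (by omega)).2 (by omega)
      have h2 := (PySem.Int.floordiv_lt_iff_lt_mul (a := m) (b := 2) (q := m) (by omega)).2 (by omega)
      rw [pvLog2Loop, if_pos h, ih _ _ (by omega)]
      conv_rhs => rw [pvLog2Loop, if_pos h, ih _ _ (by omega)]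
      omega
    · rw [pvLog2Loop, if_neg h]
      conv_rhs => rw [pvLog2Loop, if_neg h]
      omega

-- the log loop really computes floor(log2): 2^c ≤ m < 2^(c+1)
theorem pvLog2_spec : ∀ (N : Nat) (m : Int), m.toNat ≤ N → 1 ≤ m →
    0 ≤ pvLog2Loop m 0 ∧
    2 ^ (pvLog2Loop m 0).toNat ≤ m ∧ m < 2 ^ ((pvLog2Loop m 0).toNat + 1) := by
  intro N
  induction N with
  | zero => intro m hm h1; omega
  | succ N ih =>
    intro m hm h1
    by_cases h : 2 ≤ m
    · have hq1 := (PySem.Int.le_floordiv_iff_mul_le (a := m) (b := 2) (q := 1) (by omega)).2 (by omega)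
      have hq2 := (PySem.Int.floordiv_lt_iff_lt_mul (a := m) (b := 2) (q := m) (by omega)).2 (by omega)
      obtain ⟨hl0, hlow, hhigh⟩ := ih (PySem.Int.floordiv m 2) (by omega) (by omega)
      rw [pvLog2Loop, if_pos h, pvLog2_shift (PySem.Int.floordiv m 2).toNat _ _ (by omega)]
      simp only [zero_add]
      set l := pvLog2Loop (PySem.Int.floordiv m 2) 0 with hl
      have ht : (l + 1).toNat = l.toNat + 1 := by omega
      refine ⟨by omega, ?_, ?_⟩
      · rw [ht, pow_succ]
        have := (PySem.Int.le_floordiv_iff_mul_le (a := m) (b := 2)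
          (q := 2 ^ l.toNat) (by omega)).1 hlow
        omega
      · rw [ht, pow_succ]
        have := (PySem.Int.floordiv_lt_iff_lt_mul (a := m) (b := 2)
          (q := 2 ^ (l.toNat + 1)) (by omega)).1 hhigh
        rw [pow_succ] at this
        omega
    · rw [pvLog2Loop, if_neg h]
      norm_num
      omega

-- floor division composes: (n//a)//b = n//(a*b) for positive a, b
theorem pv_floordiv_floordiv (n a b : Int) (ha : 1 ≤ a) (hb : 1 ≤ b) :
    PySem.Int.floordiv (PySem.Int.floordiv n a) b = PySem.Int.floordiv n (a * b) := by
  have hab : (0:Int) < a * b := by positivity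
  apply le_antisymm
  · rw [PySem.Int.le_floordiv_iff_mul_le hab]
    have h1 := (PySem.Int.le_floordiv_iff_mul_le (a := PySem.Int.floordiv n a) (b := b)
      (q := PySem.Int.floordiv (PySem.Int.floordiv n a) b) (by omega)).1 le_rfl
    have h2 := (PySem.Int.le_floordiv_iff_mul_le (a := n) (b := a)
      (q := PySem.Int.floordiv (PySem.Int.floordiv n a) b * b) (by omega)).1 h1
    nlinarith
  · rw [PySem.Int.le_floordiv_iff_mul_le (by omega)]
    rw [PySem.Int.le_floordiv_iff_mul_le (by omega)]
    have h1 := (PySem.Int.le_floordiv_iff_mul_le (a := n) (b := a * b)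
      (q := PySem.Int.floordiv n (a * b)) hab).1 le_rfl
    nlinarith

-- every member of vals is a quotient n//x with x in [d, n]
theorem pvVals_sound : ∀ (c : Nat) (n d : Int) (hd : 1 ≤ d), (n + 1 - d).toNat ≤ c →
    ∀ q ∈ pvValsLoop n d hd, ∃ x, d ≤ x ∧ x ≤ n ∧ q = PySem.Int.floordiv n x := by
  intro c
  induction c with
  | zero =>
    intro n d hd hc q hq
    rw [pvValsLoop, dif_neg (by omega : ¬ d ≤ n)] at hq
    simp at hq
  | succ c ih =>
    intro n d hd hc q hq
    by_cases h : d ≤ n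
    · rw [pvValsLoop, dif_pos h] at hq
      obtain ⟨hq1, hdd2, hd2n, _⟩ := pvB_quot_facts n d hd h
      rcases List.mem_cons.1 hq with rfl | hq'
      · exact ⟨d, le_refl d, h, rfl⟩
      · obtain ⟨x, hx1, hx2, hx3⟩ := ih n _ _ (by omega) q hq'
        exact ⟨x, by omega, hx2, hx3⟩
    · rw [pvValsLoop, dif_neg h] at hq
      simp at hq

-- ... and every quotient n//x with x in [d, n] is a member
theorem pvVals_complete : ∀ (c : Nat) (n d : Int) (hd : 1 ≤ d), (n + 1 - d).toNat ≤ c →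
    ∀ x, d ≤ x → x ≤ n → PySem.Int.floordiv n x ∈ pvValsLoop n d hd := by
  intro c
  induction c with
  | zero => intro n d hd hc x hx1 hx2; omega
  | succ c ih =>
    intro n d hd hc x hx1 hx2
    have h : d ≤ n := by omega
    rw [pvValsLoop, dif_pos h]
    obtain ⟨hq1, hdd2, hd2n, hconst⟩ := pvB_quot_facts n d hd h
    by_cases hx : x ≤ PySem.Int.floordiv n (PySem.Int.floordiv n d)
    · rw [hconst x hx1 hx]
      exact List.mem_cons_self
    · exact List.mem_cons_of_mem _ (ih n _ _ (by omega) x (by omega) hx2)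

-- lookup in a dict built by inserting a key-determined value for every list element
theorem pv_get_fold (h : Int → Int) : ∀ (l : List Int) (d0 : PySem.Dict Int Int) (v : Int),
    (l.foldl (fun d x => d.insert x (h x)) d0).get? v =
      if v ∈ l then some (h v) else d0.get? v := by
  intro l
  induction l with
  | nil => intro d0 v; simp
  | cons a t ih =>
    intro d0 v
    simp only [List.foldl_cons, ih, List.mem_cons]
    by_cases hvt : v ∈ t
    · simp [hvt]
    · rw [if_neg hvt, PySem.Dict.get?_insert]
      by_cases hva : v = a
      · simp [hva]
      · simp [hva, hvt]

-- the block loop from d onward adds the quotient-wise sum over [d, v]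
theorem pvBlock_sum : ∀ (c : Nat) (v : Int) (prev : PySem.Dict Int Int) (s d : Int)
    (hd : 2 ≤ d), (v + 1 - d).toNat ≤ c →
    pvBlockLoop v prev s d hd =
      s + ((PySem.List.pyRange d (v + 1) 1).map
        (fun x => ((prev.get? (PySem.Int.floordiv v x)).getD 0))).sum := by
  intro c
  induction c with
  | zero =>
    intro v prev s d hd hc
    rw [pvBlockLoop, dif_neg (by omega : ¬ d ≤ v),
      PySem.List.pyRange_one_eq_nil (by omega)]
    simp
  | succ c ih =>
    intro v prev s d hd hc
    rw [pvBlockLoop]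
    by_cases h : d ≤ v
    · rw [dif_pos h]
      obtain ⟨hq1, hdd2, hd2n, hconst⟩ := pvB_quot_facts v d (by omega) h
      set q := PySem.Int.floordiv v d with hq
      set d2 := PySem.Int.floordiv v q with hd2
      rw [ih v prev _ (d2 + 1) _ (by omega)]
      rw [PySem.List.pyRange_one_append d (d2 + 1) (v + 1) (by omega) (by omega)]
      rw [List.map_append, List.sum_append]
      have hcongr : (PySem.List.pyRange d (d2 + 1) 1).map
          (fun x => ((prev.get? (PySem.Int.floordiv v x)).getD 0)) =
          (PySem.List.pyRange d (d2 + 1) 1).map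
          (fun _ => ((prev.get? q).getD 0)) := by
        apply List.map_congr_left
        intro x hx
        have := (PySem.List.mem_pyRange_one).1 hx
        rw [hconst x (by omega) (by omega)]
      rw [hcongr, PySem.List.sum_map_const_int, PySem.List.length_pyRange_one]
      have hcast : (((d2 + 1 - d).toNat : Int)) = d2 + 1 - d := by omega
      rw [hcast]
      ring
    · rw [dif_neg h, PySem.List.pyRange_one_eq_nil (by omega)]
      simp

-- the DP invariant: after j levels the table holds A's value at level j for every collected quotient
theorem pvLevels_inv (n : Int) (_hn : 2 ≤ n) : ∀ (j : Nat) (v : Int),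
    v ∈ pvValsLoop n 1 (by omega) →
    (pvLevels (pvValsLoop n 1 (by omega))
        ((pvValsLoop n 1 (by omega)).foldl (fun d v => d.insert v 1) PySem.Dict.empty)
        j).get? v = some (compute_Dk_e_at_n v (j : Int)) := by
  intro j
  induction j with
  | zero =>
    intro v hv
    rw [pvLevels, pv_get_fold (fun _ => 1), if_pos hv]
    rw [compute_Dk_e_at_n]
    simp
  | succ j ih =>
    intro v hv
    rw [pvLevels, pvLevelStep,
      pv_get_fold (fun v => pvBlockLoop v (pvLevels (pvValsLoop n 1 (by omega))
        ((pvValsLoop n 1 (by omega)).foldl (fun d v => d.insert v 1) PySem.Dict.empty) j) 0 2 (by omega)),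
      if_pos hv]
    congr 1
    obtain ⟨a, ha1, ha2, rfl⟩ :=
      pvVals_sound (n + 1 - 1).toNat n 1 (by omega) (by omega) v hv
    obtain ⟨hv1, -, -, -⟩ := pvB_quot_facts n a ha1 ha2
    set v := PySem.Int.floordiv n a with hvdef
    rw [pvBlock_sum (v + 1 - 2).toNat v _ 0 2 (by omega) (by omega), zero_add]
    by_cases hv2 : v < 2
    · rw [PySem.List.pyRange_one_eq_nil (by omega)]
      rw [compute_Dk_e_at_n, if_neg (by push_cast; omega), if_pos hv2]
      simp
    · have hc : ((j + 1 : ℕ) : ℤ) = (j : ℤ) + 1 := by push_cast; ring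
      rw [hc, pvA_eq_sum v ((j : Int) + 1) (by omega) hv2]
      refine congrArg List.sum (List.map_congr_left ?_)
      intro x hx
      have hm := (PySem.List.mem_pyRange_one).1 hx
      have hcomp := pv_floordiv_floordiv n a x ha1 (by omega)
      have hax1 : 1 ≤ a * x := by nlinarith
      have hqx1 : 1 ≤ PySem.Int.floordiv v x := (pvB_quot_facts v x (by omega) (by omega)).1
      have haxn : a * x ≤ n := by
        by_contra hc
        have : PySem.Int.floordiv n (a * x) ≤ 0 := by
          have := (PySem.Int.floordiv_lt_iff_lt_mul (a := n) (b := a * x) (q := 1)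
            (by omega)).2 (by omega)
          omega
        rw [hvdef, hcomp] at hqx1
        omega
      have hmem : PySem.Int.floordiv v x ∈ pvValsLoop n 1 (by omega) := by
        rw [hvdef, hcomp]
        exact pvVals_complete (n + 1 - 1).toNat n 1 (by omega) (by omega) (a * x) (by omega) haxn
      rw [ih (PySem.Int.floordiv v x) hmem]
      simp only [Option.getD_some]
      congr 1
      omega

-- n itself is collected (n = n//1)
theorem pv_n_mem_vals (n : Int) (hn : 2 ≤ n) : n ∈ pvValsLoop n 1 (by omega) := by
  have h1 : PySem.Int.floordiv n 1 = n := by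
    rw [PySem.Int.floordiv_eq_iff_of_pos (by omega)]
    omega
  have := pvVals_complete (n + 1 - 1).toNat n 1 (by omega) (by omega) 1 (by omega) (by omega)
  rwa [h1] at this

-- ===== VERDICT (by name: the statement is the Claim_ definition above) =====
theorem compute_Dk_e_at_n_spec : Claim_equal_compute_Dk_e_at_n := by
  intro n k _
  unfold Spec_compute_Dk_e_at_n
  rw [compute_Dk_e_at_n_alt]
  by_cases hk : k = 0
  · rw [if_pos hk, compute_Dk_e_at_n, if_pos hk]
  · rw [if_neg hk]
    by_cases h2 : n < 2
    · rw [if_pos h2, compute_Dk_e_at_n, if_neg hk, if_pos h2]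
    · rw [if_neg h2]
      obtain ⟨hc0, hclow, hchigh⟩ := pvLog2_spec n.toNat n le_rfl (by omega)
      by_cases hz : k < 0 ∨ pvLog2Loop n 0 < k
      · rw [if_pos hz]
        apply pvA_zero n.toNat n k le_rfl
        rcases hz with hneg | hbig
        · left; exact hneg
        · right
          refine ⟨by omega, ?_⟩
          calc n < 2 ^ ((pvLog2Loop n 0).toNat + 1) := hchigh
            _ ≤ 2 ^ k.toNat := by
              apply pow_le_pow_right₀ (by omega)
              omega
      · rw [if_neg hz]
        rw [not_or] at hz
        have hk1 : 1 ≤ k := by omega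
        have := pvLevels_inv n (by omega) k.toNat n (pv_n_mem_vals n (by omega))
        rw [this]
        have : ((k.toNat : Int)) = k := by omega
        rw [this]
        simp
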